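-- pv_equiv track=rewrite | github.com/foolishzhao/leetcode | python3/weekly-contest-194/_5441_Making_File_Names_Unique/main.py | getFolderNames
-- ===== SOURCE A (Python) =====
-- from typing import List
-- import collections
--
-- def getFolderNames(names: List[str]) -> List[str]:
--     suffixMp, visited = collections.defaultdict(int), set()
--     for i, name in enumerate(names):
--         if name in visited:
--             suffixMp[name] += 1
--             while (name + '(' + str(suffixMp[name]) + ')') in visited:
--                 suffixMp[name] += 1
--             names[i] = name + '(' + str(suffixMp[name]) + ')'
--         visited.add(names[i])
--     return names
-- ===== SOURCE B (Python) =====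
-- from typing import List
--
--
-- def getFolderNames(names: List[str]) -> List[str]:
--     used = set()
--     out = []
--     for name in names:
--         if name not in used:
--             final = name
--         else:
--             final = next(name + '(' + str(k) + ')'
--                          for k in range(1, len(used) + 2)
--                          if name + '(' + str(k) + ')' not in used)
--         used.add(final)
--         out.append(final)
--     names[:] = out
--     return names
-- ===== Notes on version B (the rewrite author's own statement) =====
-- stated objective: alternative
-- what changed: B drops A's memoized per-name suffix-counter dictionary entirely: it keeps a single used set, picks each collision's suffix by scanning the bounded range 1..len(used)+1 for the first free candidate (a fresh search each time instead of A's monotone counter), and builds the output as a new list it splices back into names, rather than rewriting names[i] in place.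
import Mathlib
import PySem

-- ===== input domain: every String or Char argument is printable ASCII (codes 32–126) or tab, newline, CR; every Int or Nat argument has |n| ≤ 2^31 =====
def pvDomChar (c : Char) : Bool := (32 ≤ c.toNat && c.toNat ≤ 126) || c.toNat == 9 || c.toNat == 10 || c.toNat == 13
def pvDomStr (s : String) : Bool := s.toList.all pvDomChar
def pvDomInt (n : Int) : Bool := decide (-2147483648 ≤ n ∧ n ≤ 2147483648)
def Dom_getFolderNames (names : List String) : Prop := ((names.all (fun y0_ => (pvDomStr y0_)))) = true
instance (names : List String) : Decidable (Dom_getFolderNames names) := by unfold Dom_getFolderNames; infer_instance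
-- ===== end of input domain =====

-- B replaces A's memoized per-name suffix-counter dictionary by a bounded first-free search
-- over range(1, len(used)+2) against the single used set, folding the output into a fresh list
-- that is spliced back into names (same observable mutation of the argument as A).


-- ===== PORT A =====
-- A's inner while loop: keeps incrementing suffixMp[name] while the candidate is used.
-- fuel = |visited|+1 is a totality guard only (proved sufficient below).
def loopA (visited : PySem.Set String) (name : String) (sfx : PySem.Dict String Int)
    (fuel : Nat) : PySem.Dict String Int :=
  match fuel with
  | 0 => sfx
  | fuel + 1 =>
    if PySem.Set.contains visited (name ++ "(" ++ PySem.Int.toStr (sfx.getD name 0) ++ ")") then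
      loopA visited name (sfx.modify name 0 (· + 1)) fuel
    else sfx

def goA (sfx : PySem.Dict String Int) (visited : PySem.Set String) (rest : List String) :
    List String :=
  match rest with
  | [] => []
  | name :: rest =>
    if PySem.Set.contains visited name then
      let sfx1 := sfx.modify name 0 (· + 1)
      let sfx2 := loopA visited name sfx1 (visited.length + 1)
      let nn := name ++ "(" ++ PySem.Int.toStr (sfx2.getD name 0) ++ ")"
      nn :: goA sfx2 (PySem.Set.add visited nn) rest
    else
      name :: goA sfx (PySem.Set.add visited name) rest

def getFolderNames (names : List String) : List String :=
  goA PySem.Dict.empty PySem.Set.empty names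

-- ===== PORT B =====
-- B's first-free search: next(... for k in range(1, len(used)+2) if candidate not in used).
-- The none branch is unreachable (a free candidate always exists in the range — pigeonhole,
-- proved below); Python's next would raise StopIteration there.
def pickFreeName (used : PySem.Set String) (name : String) : String :=
  match (PySem.List.pyRange 1 ((used.length : Int) + 2) 1).find?
      (fun k => !(PySem.Set.contains used (name ++ "(" ++ PySem.Int.toStr k ++ ")"))) with
  | some k => name ++ "(" ++ PySem.Int.toStr k ++ ")"
  | none => name

def stepB (st : PySem.Set String × List String) (name : String) :
    PySem.Set String × List String :=
  let final := if PySem.Set.contains st.1 name then pickFreeName st.1 name else name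
  (PySem.Set.add st.1 final, final :: st.2)

def getFolderNames_alt (names : List String) : List String :=
  ((names.foldl stepB (PySem.Set.empty, [])).2).reverse

-- ===== PRECONDITION & SPEC =====
def Spec_getFolderNames (names : List String) (out : List String) : Prop := out = getFolderNames_alt names
instance (names : List String) (out : List String) : Decidable (Spec_getFolderNames names out) := by unfold Spec_getFolderNames; infer_instance

-- ===== CLAIM (what is proved, stated in full; the proofs are below) =====
def Claim_equal_getFolderNames : Prop := ∀ (names : List String), Dom_getFolderNames names → Spec_getFolderNames names (getFolderNames names)

-- ===== LEMMAS AND PROOFS =====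

-- the candidate string name ++ "(" ++ str j ++ ")"
def cand (name : String) (j : Int) : String := name ++ "(" ++ PySem.Int.toStr j ++ ")"

-- decimal decode, a left inverse of Nat.toDigits 10
def decDec (l : List Char) : Nat := l.foldl (fun a c => a * 10 + (c.toNat - 48)) 0

theorem toDigitsCore_append (b f : Nat) :
    ∀ (n : Nat) (acc : List Char),
      Nat.toDigitsCore b f n acc = Nat.toDigitsCore b f n [] ++ acc := by
  induction f with
  | zero => intro n acc; simp [Nat.toDigitsCore]
  | succ f ih =>
    intro n acc
    simp only [Nat.toDigitsCore]
    by_cases h : n / b = 0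
    · simp [h]
    · simp only [h, if_false]
      rw [ih (n / b) (Nat.digitChar (n % b) :: acc), ih (n / b) [Nat.digitChar (n % b)]]
      simp

theorem decDec_append_singleton (l : List Char) (c : Char) :
    decDec (l ++ [c]) = decDec l * 10 + (c.toNat - 48) := by
  simp [decDec]

theorem toNat_digitChar (d : Nat) (hd : d < 10) : (Nat.digitChar d).toNat - 48 = d := by
  interval_cases d <;> decide

theorem decDec_toDigitsCore (f : Nat) :
    ∀ n : Nat, n < 10 ^ f → decDec (Nat.toDigitsCore 10 f n []) = n := by
  induction f with
  | zero => intro n h; simp [Nat.toDigitsCore, decDec]; omega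
  | succ f ih =>
    intro n h
    simp only [Nat.toDigitsCore]
    by_cases h0 : n / 10 = 0
    · have hn : n < 10 := by omega
      simp only [h0, if_true]
      have : decDec [Nat.digitChar (n % 10)] = n % 10 := by
        simp [decDec, toNat_digitChar (n % 10) (Nat.mod_lt _ (by norm_num))]
      rw [this, Nat.mod_eq_of_lt hn]
    · simp only [h0, if_false]
      rw [toDigitsCore_append, decDec_append_singleton]
      have hdiv : n / 10 < 10 ^ f := by
        apply Nat.div_lt_of_lt_mul
        calc n < 10 ^ (f + 1) := h
          _ = 10 * 10 ^ f := by ring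
      rw [ih (n / 10) hdiv, toNat_digitChar (n % 10) (Nat.mod_lt _ (by norm_num))]
      omega

theorem toDigits_ten_inj {a b : Nat} (h : Nat.toDigits 10 a = Nat.toDigits 10 b) : a = b := by
  have ha : a < 10 ^ (a + 1) :=
    lt_of_lt_of_le (Nat.lt_pow_self (by norm_num)) (Nat.pow_le_pow_right (by norm_num) (by omega))
  have hb : b < 10 ^ (b + 1) :=
    lt_of_lt_of_le (Nat.lt_pow_self (by norm_num)) (Nat.pow_le_pow_right (by norm_num) (by omega))
  have := decDec_toDigitsCore (a + 1) a ha
  rw [show Nat.toDigitsCore 10 (a + 1) a [] = Nat.toDigits 10 a from rfl, h,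
    show Nat.toDigits 10 b = Nat.toDigitsCore 10 (b + 1) b [] from rfl,
    decDec_toDigitsCore (b + 1) b hb] at this
  omega

theorem toChars_inj_nonneg {a b : Int} (ha : 0 ≤ a) (hb : 0 ≤ b)
    (h : PySem.Int.toChars a = PySem.Int.toChars b) : a = b := by
  unfold PySem.Int.toChars at h
  rw [if_neg (by omega), if_neg (by omega)] at h
  have := toDigits_ten_inj h
  omega

theorem cand_inj {name : String} {i j : Int} (hi : 0 ≤ i) (hj : 0 ≤ j)
    (h : cand name i = cand name j) : i = j := by
  unfold cand at h
  have h' : name.toList ++ "(".toList ++ (PySem.Int.toStr i).toList ++ ")".toList =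
      name.toList ++ "(".toList ++ (PySem.Int.toStr j).toList ++ ")".toList := by
    have := congrArg String.toList h
    simpa [String.toList_append, List.append_assoc] using this
  have h2 : (PySem.Int.toStr i).toList = (PySem.Int.toStr j).toList := by
    have := List.append_cancel_right h'
    exact List.append_cancel_left this
  rw [PySem.Int.toList_toStr, PySem.Int.toList_toStr] at h2
  exact toChars_inj_nonneg hi hj h2

-- ∃ a free candidate within any |v|+1 consecutive suffixes (pigeonhole)
theorem exists_free (v : List String) (name : String) (k : Int) (hk : 0 ≤ k) :
    ∃ d : Nat, d < v.length + 1 ∧ cand name (k + d) ∉ v := by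
  by_contra hall
  push Not at hall
  have hmem : ∀ d ∈ Finset.range (v.length + 1), cand name (k + d) ∈ v.toFinset := by
    intro d hd
    rw [List.mem_toFinset]
    exact hall d (Finset.mem_range.mp hd)
  have hsub : (Finset.range (v.length + 1)).image (fun d : Nat => cand name (k + d)) ⊆
      v.toFinset := by
    intro x hx
    rw [Finset.mem_image] at hx
    obtain ⟨d, hd, rfl⟩ := hx
    exact hmem d hd
  have hcard := Finset.card_le_card hsub
  have hinj : ((Finset.range (v.length + 1)).image (fun d : Nat => cand name (k + d))).card =
      v.length + 1 := by
    rw [Finset.card_image_of_injOn, Finset.card_range]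
    intro a _ b _ hab
    have := cand_inj (by omega) (by omega) hab
    omega
  have := List.toFinset_card_le v
  omega

-- characterisation of both searches: r is the first free suffix at or after start
def IsFirstFree (v : List String) (name : String) (start r : Int) : Prop :=
  start ≤ r ∧ cand name r ∉ v ∧ ∀ j, start ≤ j → j < r → cand name j ∈ v

-- A's while loop, restated as a pure search (proof-side helper for loopA's characterisation)
def loopK (v : PySem.Set String) (name : String) (k : Int) (fuel : Nat) : Int :=
  match fuel with
  | 0 => k
  | fuel + 1 =>
    if PySem.Set.contains v (name ++ "(" ++ PySem.Int.toStr k ++ ")") then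
      loopK v name (k + 1) fuel
    else k

theorem loopK_spec (v : List String) (name : String) :
    ∀ (fuel : Nat) (k : Int), (∃ d : Nat, d < fuel ∧ cand name (k + d) ∉ v) →
      IsFirstFree v name k (loopK v name k fuel) := by
  intro fuel
  induction fuel with
  | zero => intro k ⟨d, hd, _⟩; omega
  | succ fuel ih =>
    intro k ⟨d, hd, hfree⟩
    simp only [loopK]
    by_cases hmem : PySem.Set.contains v (name ++ "(" ++ PySem.Int.toStr k ++ ")") = true
    · rw [if_pos hmem]
      have hkv : cand name k ∈ v := (PySem.Set.contains_iff _ _).mp hmem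
      have hd0 : d ≠ 0 := by
        intro h; rw [h] at hfree; simp at hfree; exact hfree (by simpa [cand] using hkv)
      obtain ⟨r1, r2, r3⟩ := ih (k + 1) ⟨d - 1, by omega, by
        have : k + 1 + ((d - 1 : Nat) : Int) = k + (d : Int) := by omega
        rw [this]; exact hfree⟩
      refine ⟨by omega, r2, ?_⟩
      intro j hj1 hj2
      rcases eq_or_lt_of_le hj1 with h | h
      · rw [← h]; exact hkv
      · exact r3 j (by omega) hj2
    · rw [if_neg hmem]
      refine ⟨le_refl k, ?_, fun j h1 h2 => absurd h2 (by omega)⟩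
      intro hc
      exact hmem ((PySem.Set.contains_iff _ _).mpr (by simpa [cand] using hc))

theorem loopA_getD (v : List String) (name : String) :
    ∀ (fuel : Nat) (sfx : PySem.Dict String Int),
      (loopA v name sfx fuel).getD name 0 = loopK v name (sfx.getD name 0) fuel := by
  intro fuel
  induction fuel with
  | zero => intro sfx; rfl
  | succ fuel ih =>
    intro sfx
    simp only [loopA, loopK]
    by_cases hmem : PySem.Set.contains v
        (name ++ "(" ++ PySem.Int.toStr (sfx.getD name 0) ++ ")") = true
    · rw [if_pos hmem, if_pos hmem, ih, PySem.Dict.getD_modify_self]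
    · rw [if_neg hmem, if_neg hmem]

theorem loopA_getD_ne (v : List String) (name name' : String) (hne : name' ≠ name) :
    ∀ (fuel : Nat) (sfx : PySem.Dict String Int),
      (loopA v name sfx fuel).getD name' 0 = sfx.getD name' 0 := by
  intro fuel
  induction fuel with
  | zero => intro sfx; rfl
  | succ fuel ih =>
    intro sfx
    simp only [loopA]
    by_cases hmem : PySem.Set.contains v
        (name ++ "(" ++ PySem.Int.toStr (sfx.getD name 0) ++ ")") = true
    · rw [if_pos hmem, ih, PySem.Dict.getD_modify_of_ne _ _ _ hne]
    · rw [if_neg hmem]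

-- find? on a consecutive range finds the first element satisfying p
theorem find?_pyRange_first (p : Int → Bool) :
    ∀ (n : Nat) (a : Int), (∃ d : Nat, d < n ∧ p (a + d) = true) →
      ∃ k, (PySem.List.pyRange a (a + n) 1).find? p = some k ∧
        a ≤ k ∧ p k = true ∧ ∀ j, a ≤ j → j < k → p j = false := by
  intro n
  induction n with
  | zero => intro a ⟨d, hd, _⟩; omega
  | succ n ih =>
    intro a ⟨d, hd, hp⟩
    rw [PySem.List.pyRange_one_cons (by omega)]
    by_cases hpa : p a = true
    · exact ⟨a, by simp [List.find?, hpa], le_refl a, hpa,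
        fun j h1 h2 => absurd h2 (by omega)⟩
    · have hd0 : d ≠ 0 := by
        intro h; rw [h] at hp; simp at hp; exact hpa hp
      obtain ⟨k, hk1, hk2, hk3, hk4⟩ := ih (a + 1) ⟨d - 1, by omega, by
        have : a + 1 + ((d - 1 : Nat) : Int) = a + (d : Int) := by omega
        rw [this]; exact hp⟩
      refine ⟨k, ?_, by omega, hk3, ?_⟩
      · have : a + 1 + (n : Int) = a + ((n : Nat) + 1 : Nat) := by push_cast; ring
        rw [← this]
        simp [List.find?, hpa]
        exact hk1
      · intro j hj1 hj2
        rcases eq_or_lt_of_le hj1 with h | h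
        · rw [← h]; simpa using hpa
        · exact hk4 j (by omega) hj2

-- B's pickFreeName returns the candidate with the FIRST free suffix from 1
theorem pickFreeName_spec (v : PySem.Set String) (name : String) :
    ∃ k, pickFreeName v name = cand name k ∧ IsFirstFree v name 1 k := by
  obtain ⟨d, hd, hfree⟩ := exists_free v name 1 (by omega)
  obtain ⟨k, hk1, hk2, hk3, hk4⟩ := find?_pyRange_first
    (fun k => !(PySem.Set.contains v (name ++ "(" ++ PySem.Int.toStr k ++ ")")))
    (v.length + 1) 1
    ⟨d, hd, by
      simp only [Bool.not_eq_true']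
      rw [← Bool.not_eq_true]
      intro hc
      exact hfree ((PySem.Set.contains_iff _ _).mp (by simpa [cand] using hc))⟩
  have hcast : (1 : Int) + ((v.length + 1 : Nat) : Int) = (v.length : Int) + 2 := by
    push_cast; ring
  refine ⟨k, ?_, hk2, ?_, ?_⟩
  · unfold pickFreeName
    rw [← hcast, hk1]
    rfl
  · intro hc
    rw [show cand name k = name ++ "(" ++ PySem.Int.toStr k ++ ")" from rfl] at hc
    rw [(PySem.Set.contains_iff _ _).mpr hc] at hk3
    simp at hk3
  · intro j hj1 hj2
    have := hk4 j hj1 hj2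
    simp only [Bool.not_eq_false'] at this
    exact (PySem.Set.contains_iff _ _).mp this

-- the two searches agree when every suffix 1..c is already used
theorem firstFree_unique (v : List String) (name : String) {c r r' : Int} (hc : 0 ≤ c)
    (hall : ∀ j, 1 ≤ j → j ≤ c → cand name j ∈ v)
    (h1 : IsFirstFree v name 1 r) (h2 : IsFirstFree v name (c + 1) r') : r = r' := by
  obtain ⟨ha1, ha2, ha3⟩ := h1
  obtain ⟨hb1, hb2, hb3⟩ := h2
  have hrc : c + 1 ≤ r := by
    by_contra h
    exact ha2 (hall r (by omega) (by omega))
  rcases lt_trichotomy r r' with h | h | h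
  · exact absurd (hb3 r hrc h) ha2
  · exact h
  · exact absurd (ha3 r' (by omega) h) hb2

-- B restated as a cons-producing recursion (bridged to the foldl/reverse form below)
def goB (v : PySem.Set String) (rest : List String) : List String :=
  match rest with
  | [] => []
  | name :: rest =>
    let final := if PySem.Set.contains v name then pickFreeName v name else name
    final :: goB (PySem.Set.add v final) rest

theorem foldl_stepB_eq_goB :
    ∀ (rest : List String) (v : PySem.Set String) (acc : List String),
      (rest.foldl stepB (v, acc)).2 = (goB v rest).reverse ++ acc := by
  intro rest
  induction rest with
  | nil => intro v acc; simp [goB]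
  | cons name rest ih =>
    intro v acc
    simp only [List.foldl_cons, goB, stepB]
    rw [ih]
    simp

theorem alt_eq_goB (names : List String) :
    getFolderNames_alt names = goB PySem.Set.empty names := by
  unfold getFolderNames_alt
  rw [foldl_stepB_eq_goB]
  simp

-- the invariant tying A's counter dictionary to the used set
def CtrInv (sfx : PySem.Dict String Int) (v : List String) : Prop :=
  ∀ name, 0 ≤ sfx.getD name 0 ∧
    ∀ j, 1 ≤ j → j ≤ sfx.getD name 0 → cand name j ∈ v

theorem go_eq : ∀ (rest : List String) (sfx : PySem.Dict String Int) (v : PySem.Set String),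
    CtrInv sfx v → goA sfx v rest = goB v rest := by
  intro rest
  induction rest with
  | nil => intro sfx v _; rfl
  | cons name rest ih =>
    intro sfx v hInv
    simp only [goA, goB]
    by_cases hmem : PySem.Set.contains v name = true
    · rw [if_pos hmem]
      simp only [if_pos hmem]
      obtain ⟨hc0, hcall⟩ := hInv name
      set c := sfx.getD name 0 with hcdef
      set sfx1 := sfx.modify name 0 (· + 1) with hsfx1
      set sfx2 := loopA v name sfx1 (v.length + 1) with hsfx2
      have hsfx1name : sfx1.getD name 0 = c + 1 := by
        rw [hsfx1, PySem.Dict.getD_modify_self]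
      have hkA : sfx2.getD name 0 = loopK v name (c + 1) (v.length + 1) := by
        rw [hsfx2, loopA_getD, hsfx1name]
      have hffA : IsFirstFree v name (c + 1) (sfx2.getD name 0) := by
        rw [hkA]
        exact loopK_spec v name _ (c + 1) (exists_free v name (c + 1) (by omega))
      obtain ⟨kB, hpick, hffB⟩ := pickFreeName_spec v name
      have hkeq : kB = sfx2.getD name 0 :=
        firstFree_unique v name hc0 hcall hffB hffA
      have hnn : pickFreeName v name = name ++ "(" ++ PySem.Int.toStr (sfx2.getD name 0) ++ ")" := by
        rw [hpick, hkeq]; rfl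
      obtain ⟨hge, hfreeA, hbetween⟩ := hffA
      have hknn : 0 ≤ sfx2.getD name 0 := by omega
      rw [hnn]
      refine congrArg _ (ih sfx2 _ ?_)
      intro name'
      by_cases hname : name' = name
      · subst hname
        refine ⟨hknn, ?_⟩
        intro j hj1 hj2
        rcases lt_or_ge c j with h | h
        · rcases eq_or_lt_of_le hj2 with h2 | h2
          · rw [h2]
            show cand name' (sfx2.getD name' 0) ∈ PySem.Set.add v (cand name' (sfx2.getD name' 0))
            rw [PySem.Set.mem_add]
            right; rfl
          · have : cand name' j ∈ v := hbetween j (by omega) h2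
            rw [PySem.Set.mem_add]; left; exact this
        · have : cand name' j ∈ v := hcall j hj1 h
          rw [PySem.Set.mem_add]; left; exact this
      · have hgd : sfx2.getD name' 0 = sfx.getD name' 0 := by
          rw [hsfx2, loopA_getD_ne v name name' hname, hsfx1,
            PySem.Dict.getD_modify_of_ne _ _ _ hname]
        obtain ⟨h1, h2⟩ := hInv name'
        refine ⟨by rw [hgd]; exact h1, ?_⟩
        intro j hj1 hj2
        rw [hgd] at hj2
        rw [PySem.Set.mem_add]; left; exact h2 j hj1 hj2
    · rw [if_neg hmem]
      simp only [if_neg hmem]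
      refine congrArg _ (ih sfx _ ?_)
      intro name'
      obtain ⟨h1, h2⟩ := hInv name'
      refine ⟨h1, ?_⟩
      intro j hj1 hj2
      rw [PySem.Set.mem_add]; left; exact h2 j hj1 hj2

-- ===== VERDICT (by name: the statement is the Claim_ definition above) =====
theorem getFolderNames_spec : Claim_equal_getFolderNames := by
  intro names _
  show getFolderNames names = getFolderNames_alt names
  rw [alt_eq_goB]
  unfold getFolderNames
  apply go_eq
  intro name
  refine ⟨?_, ?_⟩
  · simp [PySem.Dict.getD, PySem.Dict.empty, PySem.Dict.get?]
  · intro j hj1 hj2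
    simp [PySem.Dict.getD, PySem.Dict.empty, PySem.Dict.get?] at hj2
    omega
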